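-- pv_equiv track=rewrite | github.com/rjovelin/Rosalind | Textbook_track/7K/BWmatching.py | occurence_index
-- ===== SOURCE A (Python) =====
-- def occurence_index(S):
--     '''
--     (str) -> list of tuples
--     Return a list of tuples containing the characters of string S in their
--     order of appearance in S with the index of occurence of of each character
--     >>> occurence_index('TCCTCTAT')
--     [('T', 1), ('C', 1), ('C', 2), ('T', 2), ('C', 3), ('T', 3), ('A', 1), ('T, 4)]
--     '''
--
--     # create a dictionnary to store the characters: count in which count is
--     # updated each time the character is found when traversing S
--     counter = {}
--
--     # create list of tuples
--     positions = []
--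
--     # loop over S
--     for symbol in S:
--         if symbol in counter:
--             positions.append((symbol, counter[symbol] + 1))
--             counter[symbol] += 1
--         else:
--             positions.append((symbol, 1))
--             counter[symbol] = 1
--     return positions
-- ===== SOURCE B (Python) =====
-- def occurence_index(S):
--     # pass 1: total count of every character
--     remaining = {}
--     for c in S:
--         remaining[c] = remaining.get(c, 0) + 1
--     # pass 2: walk S back-to-front; the running total IS the occurrence index
--     out = []
--     for c in reversed(S):
--         out.append((c, remaining[c]))
--         remaining[c] -= 1
--     out.reverse()
--     return out
-- ===== Notes on version B (the rewrite author's own statement) =====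
-- stated objective: alternative
-- what changed: Replaces the single forward pass that grows a running-count dictionary with a two-phase scheme: first total up the counts per character, then walk the string back-to-front emitting the remaining total (which at each position IS the occurrence index) while decrementing it, and reverse the output.
import Mathlib
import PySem

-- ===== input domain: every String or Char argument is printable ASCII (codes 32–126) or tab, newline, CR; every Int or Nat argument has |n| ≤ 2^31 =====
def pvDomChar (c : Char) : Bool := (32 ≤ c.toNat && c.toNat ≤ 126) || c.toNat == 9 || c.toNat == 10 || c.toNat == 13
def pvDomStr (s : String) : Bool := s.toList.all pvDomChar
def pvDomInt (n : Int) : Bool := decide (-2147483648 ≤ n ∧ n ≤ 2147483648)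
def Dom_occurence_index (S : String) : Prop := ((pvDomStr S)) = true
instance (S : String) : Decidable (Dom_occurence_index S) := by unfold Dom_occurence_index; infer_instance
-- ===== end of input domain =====

-- B replaces A's single forward pass with a running-count dictionary by two phases: total the counts per character, then walk the string back-to-front emitting the remaining total (the occurrence index) while decrementing it, and reverse the output (alternative decomposition, same cost).



-- ===== PORT A =====
-- One loop step of A: read the counter for the 1-char string, append the pair, update the counter.
def occStep (st : PySem.Dict String Int × List (String × Int)) (c : Char) :
    PySem.Dict String Int × List (String × Int) :=
  let symbol := String.ofList [c]
  match st.1.get? symbol with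
  | some v => (st.1.insert symbol (v + 1), st.2 ++ [(symbol, v + 1)])
  | none   => (st.1.insert symbol 1, st.2 ++ [(symbol, (1 : Int))])

def occurence_index (S : String) : List (String × Int) :=
  (S.toList.foldl occStep (PySem.Dict.empty, [])).2

-- ===== PORT B =====
-- Source B phase 2 loop step: append (c, remaining[c]) and decrement remaining[c].
-- (remaining[c] is always present here — every char of S was counted in phase 1 — so the
--  lookup is ported as getD; on the admitted inputs it never takes the default.)
def occStepB (st : PySem.Dict String Int × List (String × Int)) (c : Char) :
    PySem.Dict String Int × List (String × Int) :=
  let symbol := String.ofList [c]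
  (st.1.insert symbol (st.1.getD symbol 0 - 1), st.2 ++ [(symbol, st.1.getD symbol 0)])

-- 'remaining' (phase 1, the count of every char) is inlined as the fold initial state.
def occurence_index_alt (S : String) : List (String × Int) :=
  ((S.toList.reverse.foldl occStepB
      (S.toList.foldl
        (fun d c => d.insert (String.ofList [c]) (d.getD (String.ofList [c]) 0 + 1))
        PySem.Dict.empty, [])).2).reverse

-- ===== PRECONDITION & SPEC =====
def Spec_occurence_index (S : String) (out : List (String × Int)) : Prop := out = occurence_index_alt S
instance (S : String) (out : List (String × Int)) : Decidable (Spec_occurence_index S out) := by unfold Spec_occurence_index; infer_instance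


-- ===== CLAIM (what is proved, stated in full; the proofs are below) =====
def Claim_equal_occurence_index : Prop := ∀ (S : String), Dom_occurence_index S → Spec_occurence_index S (occurence_index S)

-- ===== LEMMAS AND PROOFS =====
-- tgt d l: the list A's loop appends when run over l starting from counter d.
def occTgt (d : PySem.Dict String Int) : List Char → List (String × Int)
  | [] => []
  | x :: xs =>
    (String.ofList [x], d.getD (String.ofList [x]) 0 + 1) ::
      occTgt (d.insert (String.ofList [x]) (d.getD (String.ofList [x]) 0 + 1)) xs

lemma occ_foldA (l : List Char) (d : PySem.Dict String Int) (acc : List (String × Int)) :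
    (l.foldl occStep (d, acc)).2 = acc ++ occTgt d l := by
  induction l generalizing d acc with
  | nil => simp [occTgt]
  | cons x xs ih =>
    simp only [List.foldl_cons]
    cases h : d.get? (String.ofList [x]) with
    | none =>
      have h0 : d.getD (String.ofList [x]) 0 = 0 := PySem.Dict.getD_of_get?_eq_none d _ h
      simp [occStep, h, ih, occTgt, h0]
    | some v =>
      have h0 : d.getD (String.ofList [x]) 0 = v := PySem.Dict.getD_of_get?_eq_some d _ h
      simp [occStep, h, ih, occTgt, h0]

lemma occ_key_inj (a b : Char) : String.ofList [a] = String.ofList [b] ↔ a = b := by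
  constructor
  · intro h
    simpa using congrArg String.toList h
  · intro h
    rw [h]

lemma occ_zipIdx_succ (xs : List Char) (n : Nat) :
    xs.zipIdx (n + 1) = (xs.zipIdx n).map (fun p => (p.1, p.2 + 1)) := by
  induction xs generalizing n with
  | nil => simp
  | cons x xs ih => simp [List.zipIdx_cons, ih]

lemma occ_tgt_eq (l : List Char) (d : PySem.Dict String Int) :
    occTgt d l = l.zipIdx.map
      (fun p => (String.ofList [p.1], d.getD (String.ofList [p.1]) 0 + ((l.take (p.2 + 1)).count p.1 : Int))) := by
  induction l generalizing d with
  | nil => simp [occTgt]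
  | cons x xs ih =>
    simp only [occTgt, List.zipIdx_cons, List.map_cons]
    rw [show (0:Nat)+1 = 1 from rfl]
    congr 1
    · simp
    · rw [occ_zipIdx_succ, List.map_map, ih]
      apply List.map_congr_left
      intro p _
      simp only [Function.comp]
      congr 1
      rw [PySem.Dict.getD_insert]
      by_cases hx : String.ofList [p.1] = String.ofList [x]
      · have hxc : p.1 = x := (occ_key_inj _ _).1 hx
        simp [hxc]
        ring
      · have hxc : p.1 ≠ x := fun h => hx (by rw [h])
        simp [hx, List.count_cons]
        exact fun h => hxc h.symm

def occMap (l : List Char) : List (String × Int) :=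
  l.zipIdx.map (fun p => (String.ofList [p.1], ((l.take (p.2 + 1)).count p.1 : Int)))

lemma occ_revloop (l : List Char) (d : PySem.Dict String Int) (acc : List (String × Int))
    (h : ∀ c : Char, d.getD (String.ofList [c]) 0 = (l.count c : Int)) :
    (l.reverse.foldl occStepB (d, acc)).2 = acc ++ (occMap l).reverse := by
  induction l using List.reverseRecOn generalizing d acc with
  | nil => simp [occMap]
  | append_singleton xs x ih =>
    have hx : d.getD (String.ofList [x]) 0 = (xs.count x : Int) + 1 := by
      have := h x; simpa using this
    have h' : ∀ c : Char,
        (d.insert (String.ofList [x]) (d.getD (String.ofList [x]) 0 - 1)).getD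
          (String.ofList [c]) 0 = (xs.count c : Int) := by
      intro c
      rw [PySem.Dict.getD_insert]
      by_cases hc : String.ofList [c] = String.ofList [x]
      · have : c = x := (occ_key_inj _ _).1 hc
        simp [hx, this]
      · have hcx : c ≠ x := fun e => hc (by rw [e])
        have := h c
        simp only [List.count_append, List.count_singleton] at this
        simp only [hc, if_false, this]
        have : ¬ (x = c) := fun e => hcx e.symm
        simp [this]
    have hmap : occMap (xs ++ [x])
        = occMap xs ++ [(String.ofList [x], (xs.count x : Int) + 1)] := by
      unfold occMap
      rw [List.zipIdx_append, List.map_append]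
      congr 1
      · apply List.map_congr_left
        intro p hp
        have hlt := (List.mem_zipIdx hp).2.1
        rw [List.take_append_of_le_length (by omega)]
      · simp only [List.zipIdx_cons, List.zipIdx_nil, List.map_cons, List.map_nil]
        rw [show 0 + xs.length + 1 = xs.length + 1 from by omega,
            List.take_of_length_le (by simp)]
        simp [List.count_append]
    rw [List.reverse_append, List.reverse_singleton, List.singleton_append,
        List.foldl_cons]
    have hstep : occStepB (d, acc) x
        = (d.insert (String.ofList [x]) (d.getD (String.ofList [x]) 0 - 1),
           acc ++ [(String.ofList [x], (xs.count x : Int) + 1)]) := by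
      simp [occStepB, hx]
    rw [hstep, ih _ _ h', hmap]
    simp

lemma occ_counts (l : List Char) (c : Char) :
    (l.foldl (fun d c => d.insert (String.ofList [c]) (d.getD (String.ofList [c]) 0 + 1))
        PySem.Dict.empty).getD (String.ofList [c]) 0 = (l.count c : Int) := by
  have key : ((l.map (fun c => String.ofList [c])).foldl
        (fun d k => d.insert k (d.getD k 0 + 1)) PySem.Dict.empty).getD
        (String.ofList [c]) 0 = (l.count c : Int) := by
    rw [PySem.Dict.getD_foldl_insert_add_one, PySem.Dict.getD_empty,
        List.count_map_of_injective l _ (fun a b hab => (occ_key_inj a b).1 hab)]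
    simp
  rw [List.foldl_map] at key
  exact key

lemma occ_eq (S : String) : occurence_index S = occurence_index_alt S := by
  unfold occurence_index occurence_index_alt
  rw [occ_foldA, List.nil_append, occ_tgt_eq,
      occ_revloop _ _ _ (fun c => occ_counts S.toList c), List.nil_append,
      List.reverse_reverse]
  unfold occMap
  simp [PySem.Dict.getD_empty]

-- ===== VERDICT (by name: the statement is the Claim_ definition above) =====
theorem occurence_index_spec : Claim_equal_occurence_index := by
  intro S _
  unfold Spec_occurence_index
  exact occ_eq S
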